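-- pv_equiv track=rewrite | github.com/hjle2/Algorithm | 백준/Silver/1802. 종이 접기/종이 접기.py | dfs
-- ===== SOURCE A (Python) =====
-- def dfs(inout):
--     leng = len(inout)
--     if leng == 1:
--         return True
--
--     mid = leng // 2
--
--     for i in range(mid):
--         if inout[i] == inout[-1-i]:
--             return False
--
--
--     if dfs(inout[:mid]) and dfs(inout[mid+1:]):
--         return True
--     else:
--         return False
-- ===== SOURCE B (Python) =====
-- def dfs(inout):
--     stack = [(0, len(inout))]
--     while stack:
--         lo, hi = stack.pop()
--         size = hi - lo
--         if size <= 1: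
--             continue
--         mid = size // 2
--         for i in range(mid):
--             if inout[lo + i] == inout[hi - 1 - i]:
--                 return False
--         stack.append((lo + mid + 1, hi))
--         stack.append((lo, lo + mid))
--     return True
-- ===== Notes on version B (the rewrite author's own statement) =====
-- stated objective: alternative
-- what changed: Replaced the slice-copying recursion by an iterative loop over an explicit stack of (lo, hi) index ranges into the original list, so no sublists are ever materialised.
import Mathlib
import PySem

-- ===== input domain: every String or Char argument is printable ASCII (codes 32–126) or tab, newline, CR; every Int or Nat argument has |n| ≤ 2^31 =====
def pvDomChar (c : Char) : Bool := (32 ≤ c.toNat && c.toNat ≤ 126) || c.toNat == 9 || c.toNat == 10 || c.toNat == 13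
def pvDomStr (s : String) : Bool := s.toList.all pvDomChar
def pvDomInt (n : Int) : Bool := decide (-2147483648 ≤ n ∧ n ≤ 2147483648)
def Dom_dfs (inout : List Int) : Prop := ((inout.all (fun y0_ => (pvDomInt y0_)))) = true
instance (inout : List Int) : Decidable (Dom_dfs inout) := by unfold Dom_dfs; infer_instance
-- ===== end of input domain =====

-- B replaces A's slice-copying recursion by an iterative loop over an explicit
-- stack of (lo, hi) index ranges; return values agree on every input where A returns.

-- ===== PORT A =====
-- A's pair-check loop: `for i in range(mid): if inout[i] == inout[-1-i]: return False`.
-- Indices i and -1-i are always in range (i < mid ≤ len-1), so getD with default 0 is exact.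
def clashCenter (l : List Int) : Bool :=
  (List.range (l.length / 2)).any (fun i => l.getD i 0 == l.getD (l.length - 1 - i) 0)

-- Fueled transliteration of A's recursion (A recurses forever on a length-0 segment,
-- raising RecursionError; Pre_dfs excludes exactly those runs, and on every input in
-- Pre_dfs the fuel length+1 is shown never to run out).
-- Slices inout[:mid] and inout[mid+1:] with these in-range bounds are take/drop.
def dfsF : Nat → List Int → Bool
  | 0, _ => false
  | f+1, l =>
    if l.length = 1 then true
    else
      let mid := l.length / 2
      if clashCenter l then false
      else if dfsF f (l.take mid) && dfsF f (l.drop (mid+1)) then true else false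

def dfs (inout : List Int) : Bool := dfsF (inout.length + 1) inout

-- ===== PORT B =====
-- Source B's inner pair loop over a range [lo, hi): indices always in range, getD exact.
def pairClash (l : List Int) (lo hi mid : Nat) : Bool :=
  (List.range mid).any (fun i => l.getD (lo + i) 0 == l.getD (hi - 1 - i) 0)

-- Source B's while-loop over the explicit stack; the Python loop always terminates
-- (the measure 2*Σ(hi-lo)+|stack| drops each iteration), so fuel 2*len+2 is never
-- exhausted and the 0-fuel value is unreachable.
def dfsAltF : Nat → List Int → List (Nat × Nat) → Bool
  | 0, _, _ => true
  | f+1, l, stack =>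
    match stack with
    | [] => true
    | (lo, hi) :: rest =>
      let size := hi - lo
      if size ≤ 1 then dfsAltF f l rest
      else
        let mid := size / 2
        if pairClash l lo hi mid then false
        else dfsAltF f l ((lo, lo + mid) :: (lo + mid + 1, hi) :: rest)

def dfs_alt (inout : List Int) : Bool :=
  dfsAltF (2 * inout.length + 2) inout [(0, inout.length)]

-- ===== PRECONDITION & SPEC =====
-- The preorder list of "events" of A's run: a `false` entry for each empty segment
-- (where A would recurse forever) and a `true` entry for each segment whose mirror-pair
-- scan finds an equal pair (where A returns False). A's outcome is decided by the FIRST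
-- event in this list, because A visits segments in exactly this preorder and stops at
-- the first event it meets.
def evAB : Nat → List Int → List Bool
  | 0, l => if l.length = 0 then [false] else []
  | n+1, l =>
    if l.length = 0 then [false]
    else if l.length = 1 then []
    else
      (if clashCenter l then [true] else []) ++
        evAB n (l.take (l.length / 2)) ++ evAB n (l.drop (l.length / 2 + 1))

-- The bound l.length always suffices (each sub-segment is strictly shorter), so evA is
-- the event list of the WHOLE tree; the bound is a recursion measure, never exhausted.
def evA (l : List Int) : List Bool := evAB l.length l

-- Pre_dfs is EXACTLY the set of inputs on which the Python A returns (it excludes only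
-- the RecursionError inputs): A returns unless the first event of its preorder scan is
-- an empty segment. This set is inherently recursive in the input — whether A's scan
-- reaches an empty segment depends on which equal pairs it finds first — so Pre_dfs is
-- stated via the event list, not via either port's recursion.
def Pre_dfs (inout : List Int) : Prop := ¬ ((evA inout).head? = some false)
instance (inout : List Int) : Decidable (Pre_dfs inout) := by unfold Pre_dfs; infer_instance

def pvWitness_dfs : List Int := [1, 2, 3]

def Spec_dfs (inout : List Int) (out : Bool) : Prop := out = dfs_alt inout
instance (inout : List Int) (out : Bool) : Decidable (Spec_dfs inout out) := by unfold Spec_dfs; infer_instance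

-- ===== CLAIM (what is proved, stated in full; the proofs are below) =====
def Claim_equal_dfs : Prop := ∀ (inout : List Int), Dom_dfs inout → Pre_dfs inout → Spec_dfs inout (dfs inout)

-- ===== LEMMAS AND PROOFS =====

-- Reference function: the no-events verdict (empty segments count as valid leaves).
def good (l : List Int) : Bool :=
  if l.length ≤ 1 then true
  else
    let mid := l.length / 2
    if clashCenter l then false
    else good (l.take mid) && good (l.drop (mid+1))
termination_by l.length
decreasing_by
  · simp only [List.length_take]; omega
  · simp only [List.length_drop]; omega

-- Range version of good, matching B's index arithmetic.
def goodSeg (l : List Int) (lo hi : Nat) : Bool :=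
  if hi - lo ≤ 1 then true
  else
    let mid := (hi - lo) / 2
    if pairClash l lo hi mid then false
    else goodSeg l lo (lo + mid) && goodSeg l (lo + mid + 1) hi
termination_by hi - lo
decreasing_by
  · omega
  · omega

lemma goodSeg_eq (l : List Int) (lo hi : Nat) : goodSeg l lo hi =
    if hi - lo ≤ 1 then true
    else if pairClash l lo hi ((hi - lo) / 2) then false
    else goodSeg l lo (lo + (hi - lo) / 2) && goodSeg l (lo + (hi - lo) / 2 + 1) hi := by
  rw [goodSeg]

lemma evAB_stable (n : Nat) : ∀ (m k : Nat) (l : List Int),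
    l.length ≤ m → l.length ≤ k → m ≤ n → k ≤ n → evAB m l = evAB k l := by
  induction n with
  | zero =>
    intro m k l hm hk hmn hkn
    have : m = 0 ∧ k = 0 := by omega
    rw [this.1, this.2]
  | succ n ih =>
    intro m k l hm hk hmn hkn
    match m, k with
    | 0, 0 => rfl
    | 0, k+1 =>
      have h0 : l.length = 0 := by omega
      simp [evAB, h0]
    | m+1, 0 =>
      have h0 : l.length = 0 := by omega
      simp [evAB, h0]
    | m+1, k+1 =>
      by_cases h0 : l.length = 0
      · simp [evAB, h0]
      · by_cases h1 : l.length = 1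
        · simp [evAB, h1]
        · rw [evAB, evAB, if_neg h0, if_neg h1, if_neg h0, if_neg h1]
          rw [ih m k (l.take (l.length / 2))
                (by simp only [List.length_take]; omega)
                (by simp only [List.length_take]; omega) (by omega) (by omega),
              ih m k (l.drop (l.length / 2 + 1))
                (by simp only [List.length_drop]; omega)
                (by simp only [List.length_drop]; omega) (by omega) (by omega)]

lemma evA_eq (l : List Int) : evA l =
    if l.length = 0 then [false]
    else if l.length = 1 then []
    else
      (if clashCenter l then [true] else []) ++
        evA (l.take (l.length / 2)) ++ evA (l.drop (l.length / 2 + 1)) := by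
  unfold evA
  by_cases h0 : l.length = 0
  · rw [if_pos h0]
    cases hn : l.length with
    | zero => rw [evAB, if_pos h0]
    | succ n => omega
  · obtain ⟨n, hn⟩ : ∃ n, l.length = n + 1 := ⟨l.length - 1, by omega⟩
    have e : evAB l.length l = evAB (n + 1) l := by rw [hn]
    rw [e, evAB, if_neg h0, if_neg h0]
    by_cases h1 : l.length = 1
    · rw [if_pos h1, if_pos h1]
    · rw [if_neg h1, if_neg h1]
      rw [evAB_stable n n (l.take (l.length / 2)).length (l.take (l.length / 2))
            (by simp only [List.length_take]; omega) le_rfl le_rfl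
            (by simp only [List.length_take]; omega),
          evAB_stable n n (l.drop (l.length / 2 + 1)).length (l.drop (l.length / 2 + 1))
            (by simp only [List.length_drop]; omega) le_rfl le_rfl
            (by simp only [List.length_drop]; omega)]

-- good is the "no clash event anywhere" verdict.
lemma good_iff_ev (n : Nat) : ∀ (l : List Int), l.length ≤ n →
    (good l = true ↔ true ∉ evA l) := by
  induction n with
  | zero =>
    intro l hl
    rw [good, evA_eq]
    simp [List.length_eq_zero_iff.mp (Nat.le_zero.mp hl)]
  | succ n ih =>
    intro l hl
    rw [evA_eq]
    by_cases h0 : l.length = 0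
    · rw [good]; simp [h0]
    · by_cases h1 : l.length = 1
      · rw [good]; simp [h1]
      · rw [if_neg h0, if_neg h1, good, if_neg (show ¬ l.length ≤ 1 by omega)]
        have ht : (l.take (l.length / 2)).length ≤ n := by
          simp only [List.length_take]; omega
        have hd : (l.drop (l.length / 2 + 1)).length ≤ n := by
          simp only [List.length_drop]; omega
        by_cases hc : clashCenter l
        · simp [hc]
        · have hc' : clashCenter l = false := by simpa using hc
          simp only [hc', Bool.false_eq_true, if_false, List.nil_append,
            List.mem_append, Bool.and_eq_true]
          rw [ih _ ht, ih _ hd]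
          tauto

-- If A's scan meets no event at all, the fueled A returns True.
lemma dfsF_of_ev_nil (n : Nat) : ∀ (f : Nat) (l : List Int), l.length ≤ n →
    l.length < f → evA l = [] → dfsF f l = true := by
  induction n with
  | zero =>
    intro f l hl _ hev
    rw [evA_eq] at hev
    simp [Nat.le_zero.mp hl] at hev
  | succ n ih =>
    intro f l hl hf hev
    obtain ⟨f, rfl⟩ : ∃ f', f = f' + 1 := ⟨f - 1, by omega⟩
    rw [evA_eq] at hev
    by_cases h0 : l.length = 0
    · simp [h0] at hev
    · by_cases h1 : l.length = 1
      · simp [dfsF, h1]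
      · rw [if_neg h0, if_neg h1] at hev
        rcases List.append_eq_nil_iff.mp hev with ⟨hev', hR⟩
        rcases List.append_eq_nil_iff.mp hev' with ⟨hcl, hL⟩
        have hc : clashCenter l = false := by
          by_cases hc : clashCenter l <;> simp [hc] at hcl ⊢
        rw [dfsF, if_neg h1]
        simp only [hc, Bool.false_eq_true, if_false]
        rw [ih f _ (by simp only [List.length_take]; omega)
              (by simp only [List.length_take]; omega) hL,
            ih f _ (by simp only [List.length_drop]; omega)
              (by simp only [List.length_drop]; omega) hR]
        simp

-- If the first event of A's scan is a clash, the fueled A returns False.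
lemma dfsF_of_ev_true (n : Nat) : ∀ (f : Nat) (l : List Int), l.length ≤ n →
    l.length < f → (evA l).head? = some true → dfsF f l = false := by
  induction n with
  | zero =>
    intro f l hl _ hev
    rw [evA_eq] at hev
    simp [Nat.le_zero.mp hl] at hev
  | succ n ih =>
    intro f l hl hf hev
    obtain ⟨f, rfl⟩ : ∃ f', f = f' + 1 := ⟨f - 1, by omega⟩
    rw [evA_eq] at hev
    by_cases h0 : l.length = 0
    · simp [h0] at hev
    · by_cases h1 : l.length = 1
      · simp [h1] at hev
      · rw [if_neg h0, if_neg h1] at hev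
        rw [dfsF, if_neg h1]
        by_cases hc : clashCenter l
        · simp [hc]
        · have hc' : clashCenter l = false := by simpa using hc
          simp only [hc', Bool.false_eq_true, if_false, List.nil_append] at hev ⊢
          have htlen : (l.take (l.length / 2)).length ≤ n := by
            simp only [List.length_take]; omega
          have htf : (l.take (l.length / 2)).length < f := by
            simp only [List.length_take]; omega
          have hdlen : (l.drop (l.length / 2 + 1)).length ≤ n := by
            simp only [List.length_drop]; omega
          have hdf : (l.drop (l.length / 2 + 1)).length < f := by
            simp only [List.length_drop]; omega
          cases hL : evA (l.take (l.length / 2)) with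
          | nil =>
            rw [hL, List.nil_append] at hev
            rw [dfsF_of_ev_nil n f _ htlen htf hL,
                ih f _ hdlen hdf hev]
            simp
          | cons b bs =>
            rw [hL, List.cons_append, List.head?_cons] at hev
            have hb : b = true := by simpa using hev
            rw [ih f _ htlen htf (by rw [hL, hb]; rfl)]
            simp

-- B's stack loop computes the conjunction of goodSeg over the pending ranges.
lemma dfsAltF_eq (f : Nat) : ∀ (l : List Int) (stack : List (Nat × Nat)),
    (stack.map (fun r => 2 * (r.2 - r.1) + 1)).sum < f →
    dfsAltF f l stack = stack.all (fun r => goodSeg l r.1 r.2) := by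
  induction f with
  | zero => intro l stack h; omega
  | succ f ih =>
    intro l stack h
    match stack with
    | [] => simp [dfsAltF]
    | (lo, hi) :: rest =>
      simp only [List.map_cons, List.sum_cons] at h
      simp only [List.all_cons]
      by_cases hs : hi - lo ≤ 1
      · rw [dfsAltF]
        simp only [hs, if_true]
        rw [goodSeg_eq l lo hi, if_pos hs, Bool.true_and]
        exact ih l rest (by omega)
      · rw [dfsAltF]
        simp only [hs, if_false]
        rw [goodSeg_eq l lo hi, if_neg hs]
        by_cases hc : pairClash l lo hi ((hi - lo) / 2)
        · simp [hc]
        · have hc' : pairClash l lo hi ((hi - lo) / 2) = false := by simpa using hc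
          simp only [hc', Bool.false_eq_true, if_false]
          rw [ih l _ (by
            simp only [List.map_cons, List.sum_cons]
            omega)]
          simp [List.all_cons, Bool.and_assoc]

-- goodSeg on a range equals good on the corresponding sublist.
lemma goodSeg_eq_good (l : List Int) : ∀ (n lo hi : Nat), hi - lo ≤ n → hi ≤ l.length →
    goodSeg l lo hi = good ((l.drop lo).take (hi - lo)) := by
  intro n
  induction n with
  | zero =>
    intro lo hi hle hhi
    rw [goodSeg_eq, good]
    simp [Nat.le_zero.mp hle]
  | succ n ih =>
    intro lo hi hle hhi
    by_cases hs : hi - lo ≤ 1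
    · rw [goodSeg_eq, good, if_pos hs,
        if_pos (by simp [List.length_take, List.length_drop]; omega)]
    · have hlo : lo + 2 ≤ hi := by omega
      have hsub : ((l.drop lo).take (hi - lo)).length = hi - lo := by
        simp [List.length_take, List.length_drop]; omega
      have hgetD : ∀ j, j < hi - lo →
          ((l.drop lo).take (hi - lo)).getD j 0 = l.getD (lo + j) 0 := by
        intro j hj
        simp [List.getD, hj, List.getElem?_drop]
      rw [goodSeg_eq, if_neg hs, good,
        if_neg (by omega : ¬ ((l.drop lo).take (hi - lo)).length ≤ 1)]
      have hclash : clashCenter ((l.drop lo).take (hi - lo)) = pairClash l lo hi ((hi - lo) / 2) := by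
        unfold clashCenter pairClash
        rw [hsub]
        rw [Bool.eq_iff_iff]
        simp only [List.any_eq_true, List.mem_range, beq_iff_eq]
        have hmid : (hi - lo) / 2 < hi - lo := by omega
        constructor
        · rintro ⟨i, hi', hb⟩
          refine ⟨i, hi', ?_⟩
          rw [hgetD i (by omega), hgetD (hi - lo - 1 - i) (by omega)] at hb
          rwa [(by omega : lo + (hi - lo - 1 - i) = hi - 1 - i)] at hb
        · rintro ⟨i, hi', hb⟩
          refine ⟨i, hi', ?_⟩
          rw [hgetD i (by omega), hgetD (hi - lo - 1 - i) (by omega),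
            (by omega : lo + (hi - lo - 1 - i) = hi - 1 - i)]
          exact hb
      rw [hsub, hclash]
      by_cases hc : pairClash l lo hi ((hi - lo) / 2)
      · simp [hc]
      · have hc' : pairClash l lo hi ((hi - lo) / 2) = false := by simpa using hc
        simp only [hc', Bool.false_eq_true, if_false]
        have hmid : (hi - lo) / 2 < hi - lo := by omega
        set mid := (hi - lo) / 2 with hm
        have e1 : ((l.drop lo).take (hi - lo)).take mid = (l.drop lo).take ((lo + mid) - lo) := by
          rw [List.take_take]
          congr 1
          omega
        have e2 : ((l.drop lo).take (hi - lo)).drop (mid + 1)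
            = (l.drop (lo + mid + 1)).take (hi - (lo + mid + 1)) := by
          rw [List.drop_take, List.drop_drop]
          congr 1
          all_goals omega
        rw [e1, e2,
          ← ih lo (lo + mid) (by omega) (by omega),
          ← ih (lo + mid + 1) hi (by omega) hhi]

-- B's port computes good.
lemma dfs_alt_eq_good (l : List Int) : dfs_alt l = good l := by
  unfold dfs_alt
  rw [dfsAltF_eq (2 * l.length + 2) l [(0, l.length)] (by simp)]
  simp only [List.all_cons, List.all_nil, Bool.and_true]
  rw [goodSeg_eq_good l l.length 0 l.length (by omega) (by omega)]
  simp

-- ===== VERDICT (by name: the statement is the Claim_ definition above) =====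
theorem dfs_spec : Claim_equal_dfs := by
  intro l _ hpre
  unfold Spec_dfs dfs
  rw [dfs_alt_eq_good]
  unfold Pre_dfs at hpre
  cases hh : (evA l).head? with
  | none =>
    have hnil : evA l = [] := by
      cases hev : evA l
      · rfl
      · rw [hev] at hh; simp at hh
    rw [dfsF_of_ev_nil l.length (l.length + 1) l le_rfl (by omega) hnil]
    rw [(good_iff_ev l.length l le_rfl).mpr (by simp [hnil])]
  | some b =>
    cases b with
    | false => exact absurd hh hpre
    | true =>
      rw [dfsF_of_ev_true l.length (l.length + 1) l le_rfl (by omega) hh]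
      have hmem : true ∈ evA l :=
        List.mem_of_mem_head? (by rw [hh]; rfl)
      have : ¬ good l = true := fun hg => (good_iff_ev l.length l le_rfl).mp hg hmem
      simp only [Bool.not_eq_true] at this
      rw [this]
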